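-- pv_equiv track=rewrite | github.com/dotpipe/anemone | cross_glossary_sections.py | cross_check_glossaries
-- ===== SOURCE A (Python) =====
-- from collections import defaultdict
--
-- def cross_check_glossaries(glossaries):
--     shared_terms = defaultdict(dict)
--     files = list(glossaries.keys())
--     for i, f1 in enumerate(files):
--         for j, f2 in enumerate(files):
--             if i >= j:
--                 continue
--             shared = glossaries[f1] & glossaries[f2]
--             if shared:
--                 shared_terms[f1][f2] = shared
--     return shared_terms
-- ===== SOURCE B (Python) =====
-- def cross_check_glossaries(glossaries):
--     items = list(glossaries.items())
--     # inverted index: term -> indices of the files whose glossary holds it (increasing)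
--     containing = {}
--     for j, (_, terms) in enumerate(items):
--         for t in terms:
--             containing.setdefault(t, []).append(j)
--     result = {}
--     for i, (f1, terms1) in enumerate(items):
--         bucket = {}  # later file index -> terms shared with file i
--         for t in terms1:
--             for j in containing[t]:
--                 if j > i:
--                     bucket.setdefault(j, []).append(t)
--         inner = {items[j][0]: set(bucket[j]) for j in range(i + 1, len(items)) if j in bucket}
--         if inner:
--             result[f1] = inner
--     return result
-- ===== Notes on version B (the rewrite author's own statement) =====
-- stated objective: faster
-- what changed: Replaces the all-pairs set-intersection double loop (intersecting full glossaries for every file pair) with an inverted index term->file-indices built in one pass, so shared terms are distributed to co-occurring file pairs directly and per-pair work is proportional to actual co-occurrences.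
import Mathlib
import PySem

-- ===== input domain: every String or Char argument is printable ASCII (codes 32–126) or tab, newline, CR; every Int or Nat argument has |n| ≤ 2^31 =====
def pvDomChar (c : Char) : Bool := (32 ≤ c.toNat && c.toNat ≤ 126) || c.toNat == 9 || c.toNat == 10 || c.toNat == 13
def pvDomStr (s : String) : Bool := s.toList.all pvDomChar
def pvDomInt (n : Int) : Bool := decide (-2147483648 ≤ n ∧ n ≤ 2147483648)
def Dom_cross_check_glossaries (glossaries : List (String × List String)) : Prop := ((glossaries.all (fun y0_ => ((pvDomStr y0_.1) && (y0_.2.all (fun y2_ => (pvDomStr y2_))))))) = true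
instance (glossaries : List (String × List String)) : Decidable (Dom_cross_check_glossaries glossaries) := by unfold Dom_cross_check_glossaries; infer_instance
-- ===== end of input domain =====

-- B replaces the all-pairs set-intersection double loop with an inverted index
-- (term -> file indices) that distributes each shared term to its co-occurring
-- later file pairs directly (objective: faster).


-- ===== PORT A =====
-- glossaries[f] : dict lookup (first match; under Pre_ the keys are distinct)
def pvLookup (glossaries : List (String × List String)) (f : String) : List String :=
  (List.lookup f glossaries).getD []

def cross_check_glossaries (glossaries : List (String × List String)) :
    List (String × List (String × List String)) :=
  -- files = list(glossaries.keys()); under Pre_ (distinct keys) this is the key list in order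
  let files := glossaries.map Prod.fst
  (PySem.List.enumerate files).foldl (fun outer if1 =>
    let i := if1.1
    let f1 := if1.2
    let inner := (PySem.List.enumerate files).foldl (fun inner jf2 =>
      let j := jf2.1
      let f2 := jf2.2
      if i ≥ j then inner
      else
        let shared := PySem.Set.inter (pvLookup glossaries f1) (pvLookup glossaries f2)
        if shared ≠ [] then inner ++ [(f2, shared)] else inner) []
    if inner ≠ [] then outer ++ [(f1, inner)] else outer) []

-- ===== PORT B =====
def cross_check_glossaries_alt (glossaries : List (String × List String)) :
    List (String × List (String × List String)) :=
  let items := glossaries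
  -- inverted index: term -> indices of the files whose glossary holds it
  let containing : PySem.Dict String (List Int) :=
    (PySem.List.enumerate items).foldl (fun d jp =>
      jp.2.2.foldl (fun d t => d.modify t [] (· ++ [jp.1])) d) PySem.Dict.empty
  (PySem.List.enumerate items).foldl (fun result ip =>
    let i := ip.1
    let f1 := ip.2.1
    let terms1 := ip.2.2
    let bucket : PySem.Dict Int (List String) :=
      terms1.foldl (fun b t =>
        (containing.getD t []).foldl (fun b j =>
          if j > i then b.modify j [] (· ++ [t]) else b) b) PySem.Dict.empty
    let inner := (PySem.List.pyRange (i + 1) items.length).foldl (fun inner j =>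
      if bucket.contains j then
        inner ++ [((PySem.List.pyGetD items j ("", [])).1, PySem.Set.ofList (bucket.getD j []))]
      else inner) []
    if inner ≠ [] then result ++ [(f1, inner)] else result) []

-- ===== PRECONDITION & SPEC =====
-- Pre_ excludes association lists with a repeated key or a repeated element inside a
-- value list: the argument encodes a Python dict of sets, and such lists do not
-- represent any Python input (dict keys and set elements are unique).
def Pre_cross_check_glossaries (glossaries : List (String × List String)) : Prop :=
  (glossaries.map Prod.fst).Nodup ∧ ∀ p ∈ glossaries, p.2.Nodup
instance (glossaries : List (String × List String)) : Decidable (Pre_cross_check_glossaries glossaries) := by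
  unfold Pre_cross_check_glossaries; infer_instance

def pvWitness_cross_check_glossaries : (List (String × List String)) :=
  [("a.md", ["x", "y"]), ("b.md", ["y", "z"]), ("c.md", ["z"])]

def Spec_cross_check_glossaries (glossaries : List (String × List String)) (out : List (String × List (String × List String))) : Prop := out = cross_check_glossaries_alt glossaries
instance (glossaries : List (String × List String)) (out : List (String × List (String × List String))) : Decidable (Spec_cross_check_glossaries glossaries out) := by unfold Spec_cross_check_glossaries; infer_instance

-- ===== CLAIM (what is proved, stated in full; the proofs are below) =====
def Claim_equal_cross_check_glossaries : Prop := ∀ (glossaries : List (String × List String)), Dom_cross_check_glossaries glossaries → Pre_cross_check_glossaries glossaries → Spec_cross_check_glossaries glossaries (cross_check_glossaries glossaries)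

-- ===== LEMMAS AND PROOFS =====

theorem pv_enumerate_eq {α : Type} (d : α) (l : List α) (s : Int) :
    PySem.List.enumerate l s = (List.range l.length).map (fun (k : Nat) => (s + (k : Int), l.getD k d)) := by
  induction l generalizing s with
  | nil => simp [PySem.List.enumerate]
  | cons x t ih =>
    simp only [PySem.List.enumerate, List.length_cons, List.range_succ_eq_map, List.map_cons,
      List.map_map, ih (s+1)]
    refine List.cons_eq_cons.mpr ⟨by simp, ?_⟩
    apply List.map_congr_left
    intro k hk
    simp only [Function.comp, Nat.succ_eq_add_one, List.getD_cons_succ]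
    refine Prod.ext ?_ rfl
    push_cast
    ring

theorem pv_foldl_addacc {α : Type} [BEq α] [LawfulBEq α] (l : List α) (s : List α)
    (hd : ∀ x ∈ l, x ∉ s) (h : l.Nodup) : l.foldl PySem.Set.add s = s ++ l := by
  induction l generalizing s with
  | nil => simp
  | cons x t ih =>
    simp only [List.foldl_cons]
    have hx : PySem.Set.add s x = s ++ [x] := by
      simp [PySem.Set.add, PySem.Set.contains]
      intro hmem
      exact absurd hmem (hd x (by simp))
    rw [hx, ih]
    · simp
    · intro y hy
      simp only [List.mem_append, List.mem_singleton]
      rintro (hs | rfl)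
      · exact hd y (by simp [hy]) hs
      · exact (List.nodup_cons.mp h).1 hy
    · exact (List.nodup_cons.mp h).2

theorem pv_ofList_nodup {α : Type} [BEq α] [LawfulBEq α] (l : List α) (h : l.Nodup) :
    PySem.Set.ofList l = l := by
  rw [PySem.Set.ofList_eq_foldl, pv_foldl_addacc l [] (by simp) h]
  simp

theorem pv_getD_map {α β : Type} (l : List α) (f : α → β) (k : Nat) (x : β) (y : α)
    (h : k < l.length) : (l.map f).getD k x = f (l.getD k y) := by
  simp [List.getD, List.getElem?_map, List.getElem?_eq_getElem h]

theorem pv_lookup_mem {α β : Type} [BEq α] [LawfulBEq α] (l : List (α × β)) (p : α × β)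
    (h : p ∈ l) (hnd : (l.map Prod.fst).Nodup) : List.lookup p.1 l = some p.2 := by
  induction l with
  | nil => simp at h
  | cons q t ih =>
    rcases List.mem_cons.mp h with rfl | hm
    · simp [List.lookup]
    · have hne : p.1 ≠ q.1 := by
        intro he
        have : q.1 ∈ t.map Prod.fst := he ▸ List.mem_map_of_mem hm
        exact (List.nodup_cons.mp (by simpa using hnd)).1 this
      have hbeq : (p.1 == q.1) = false := by simpa using hne
      simp only [List.lookup, hbeq]
      exact ih hm (by simpa using (List.nodup_cons.mp (by simpa using hnd)).2)

theorem pv_foldl_skip {β : Type} (n ki : Nat) (h : β → Nat → β) (init : β) :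
    (List.range n).foldl (fun acc k => if k ≤ ki then acc else h acc k) init
      = (List.range (n - (ki+1))).foldl (fun acc k => h acc (ki+1+k)) init := by
  by_cases hn : ki + 1 ≤ n
  · have hsplit : n = (ki+1) + (n - (ki+1)) := by omega
    rw [hsplit, List.range_add, List.foldl_append, List.foldl_map]
    have h1 : (List.range (ki+1)).foldl (fun acc k => if k ≤ ki then acc else h acc k) init = init := by
      have : ∀ (L : List Nat), (∀ x ∈ L, x ≤ ki) → ∀ (b : β),
          L.foldl (fun acc k => if k ≤ ki then acc else h acc k) b = b := by
        intro L
        induction L with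
        | nil => intro _ b; simp
        | cons a t iht =>
          intro hall b
          simp only [List.foldl_cons, if_pos (hall a (by simp))]
          exact iht (fun x hx => hall x (by simp [hx])) b
      exact this _ (fun x hx => by have := List.mem_range.mp hx; omega) init
    rw [h1]
    have hred : ki + 1 + (n - (ki + 1)) - (ki + 1) = n - (ki+1) := by omega
    rw [hred]
    apply PySem.List.foldl_congr_mem
    intro acc k hk
    have : ¬ (ki + 1 + k ≤ ki) := by omega
    simp [this]
  · have h0 : n - (ki+1) = 0 := by omega
    rw [h0]
    simp only [List.range_zero, List.foldl_nil]
    have : ∀ (L : List Nat), (∀ x ∈ L, x ≤ ki) → ∀ (b : β),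
        L.foldl (fun acc k => if k ≤ ki then acc else h acc k) b = b := by
      intro L
      induction L with
      | nil => intro _ b; simp
      | cons a t iht =>
        intro hall b
        simp only [List.foldl_cons, if_pos (hall a (by simp))]
        exact iht (fun x hx => hall x (by simp [hx])) b
    exact this _ (fun x hx => by have := List.mem_range.mp hx; omega) init

theorem pv_pyRange_nat (a b : Nat) :
    PySem.List.pyRange (a : Int) (b : Int) 1
      = (List.range (b - a)).map (fun (k : Nat) => ((a + k : Nat) : Int)) := by
  simp only [PySem.List.pyRange]
  norm_num
  have : (if a < b then b - a else 0) = b - a := by split <;> omega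
  rw [this]

theorem pv_modify_getD {κ ν : Type} [BEq κ] [LawfulBEq κ] [DecidableEq κ]
    (d : PySem.Dict κ ν) (u t : κ) (dflt : ν) (f : ν → ν) (d0 : ν) :
    (d.modify u dflt f).getD t d0 = if t = u then f (d.getD u dflt) else d.getD t d0 := by
  simp [PySem.Dict.modify, PySem.Dict.getD_insert]

theorem pv_contain_step (j : Int) (terms : List String) (hnd : terms.Nodup)
    (d : PySem.Dict String (List Int)) (t : String) :
    (terms.foldl (fun d u => d.modify u [] (· ++ [j])) d).getD t []
      = d.getD t [] ++ (if t ∈ terms then [j] else []) := by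
  induction terms generalizing d with
  | nil => simp
  | cons u rest ih =>
    simp only [List.foldl_cons]
    rw [ih (List.nodup_cons.mp hnd).2]
    by_cases htu : t = u
    · subst htu
      have : t ∉ rest := (List.nodup_cons.mp hnd).1
      simp [this]
    · rw [pv_modify_getD]
      simp only [if_neg htu]
      by_cases hr : t ∈ rest <;> simp [hr, htu]

def pvD0 : String × List String := ("", [])

theorem pv_containing_char (gs : List (String × List String)) (L : List Nat)
    (hv : ∀ k ∈ L, (gs.getD k pvD0).2.Nodup) (d : PySem.Dict String (List Int)) (t : String) :
    (L.foldl (fun d k => (gs.getD k pvD0).2.foldl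
        (fun d u => d.modify u [] (· ++ [(k : Int)])) d) d).getD t []
      = d.getD t [] ++ (L.filter (fun k => decide (t ∈ (gs.getD k pvD0).2))).map (fun (k : Nat) => (k : Int)) := by
  induction L generalizing d with
  | nil => simp
  | cons k rest ih =>
    simp only [List.foldl_cons]
    rw [ih (fun x hx => hv x (by simp [hx])),
        pv_contain_step (k : Int) _ (hv k (by simp)) d t]
    by_cases ht : t ∈ (gs.getD k pvD0).2
    · simp only [List.getD] at ht
      simp [ht]
    · simp only [List.getD] at ht
      simp [ht]

theorem pv_modify_get? {κ ν : Type} [BEq κ] [LawfulBEq κ] [DecidableEq κ]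
    (d : PySem.Dict κ ν) (u t : κ) (dflt : ν) (f : ν → ν) :
    (d.modify u dflt f).get? t = if t = u then some (f (d.getD u dflt)) else d.get? t := by
  by_cases h : t = u
  · subst h; simp [PySem.Dict.modify, PySem.Dict.get?_insert_self]
  · simp [PySem.Dict.modify, PySem.Dict.get?_insert_of_ne _ _ h, h]

theorem pv_bucket_inner (i : Int) (t : String) (L : List Int) (hnd : L.Nodup)
    (b : PySem.Dict Int (List String)) (j : Int) :
    ((L.foldl (fun b j' => if j' > i then b.modify j' [] (· ++ [t]) else b) b).get? j)
      = if j ∈ L ∧ j > i then some (b.getD j [] ++ [t]) else b.get? j := by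
  induction L generalizing b with
  | nil => simp
  | cons a rest ih =>
    simp only [List.foldl_cons]
    rw [ih (List.nodup_cons.mp hnd).2]
    by_cases hja : j = a
    · subst hja
      have hnr : j ∉ rest := (List.nodup_cons.mp hnd).1
      by_cases hji : j > i
      · simp [hnr, hji, pv_modify_get?, PySem.Dict.getD]
      · simp [hnr, hji]
    · have h1 : (if a > i then b.modify a [] (fun x => x ++ [t]) else b).get? j = b.get? j := by
        split
        · rw [pv_modify_get?, if_neg hja]
        · rfl
      simp only [h1, PySem.Dict.getD, List.mem_cons]
      by_cases hjr : j ∈ rest ∧ j > i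
      · rw [if_pos hjr, if_pos ⟨Or.inr hjr.1, hjr.2⟩]
      · rw [if_neg hjr, if_neg (by rintro ⟨h1 | h1, h2⟩; exacts [absurd h1 hja, absurd ⟨h1, h2⟩ hjr])]

def pvCombine (o : Option (List String)) (l : List String) : Option (List String) :=
  if o = none ∧ l = [] then none else some (o.getD [] ++ l)

theorem pv_bucket_char (i j : Int) (hji : j > i) (C : String → List Int)
    (hC : ∀ t, (C t).Nodup) (ts : List String) (b : PySem.Dict Int (List String)) :
    (ts.foldl (fun b t => (C t).foldl
        (fun b j' => if j' > i then b.modify j' [] (· ++ [t]) else b) b) b).get? j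
      = pvCombine (b.get? j) (ts.filter (fun t => decide (j ∈ C t))) := by
  induction ts generalizing b with
  | nil =>
    simp only [List.foldl_nil, List.filter_nil, pvCombine]
    cases h : b.get? j
    · simp
    · simp
  | cons t rest ih =>
    simp only [List.foldl_cons, List.filter_cons]
    rw [ih]
    have hstep := pv_bucket_inner i t (C t) (hC t) b j
    by_cases hjc : j ∈ C t
    · rw [decide_eq_true hjc]
      rw [hstep, if_pos ⟨hjc, hji⟩]
      simp only [pvCombine, PySem.Dict.getD]
      cases h : b.get? j <;> simp
    · rw [decide_eq_false hjc]
      rw [hstep, if_neg (by rintro ⟨h1, _⟩; exact hjc h1)]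
      simp


def pvInnerS (gs : List (String × List String)) (k : Nat) : List (String × List String) :=
  (List.range (gs.length - (k+1))).foldl (fun inn k2 =>
    let q := gs.getD (k+1+k2) pvD0
    let shared := (gs.getD k pvD0).2.filter (fun t => PySem.Set.contains q.2 t)
    if shared ≠ [] then inn ++ [(q.1, shared)] else inn) []

def pvSpecF (gs : List (String × List String)) : List (String × List (String × List String)) :=
  (List.range gs.length).foldl (fun outer k =>
    let inner := pvInnerS gs k
    if inner ≠ [] then outer ++ [((gs.getD k pvD0).1, inner)] else outer) []

theorem pv_getD_eq_getElem {α : Type} (l : List α) (k : Nat) (d : α) (h : k < l.length) :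
    l.getD k d = l[k] := by
  simp [List.getD, List.getElem?_eq_getElem h]

theorem pv_lookup_getD (gs : List (String × List String)) (m : Nat) (hm : m < gs.length)
    (hnd : (gs.map Prod.fst).Nodup) :
    pvLookup gs ((gs.getD m pvD0).1) = (gs.getD m pvD0).2 := by
  have hmem : gs.getD m pvD0 ∈ gs := by
    rw [pv_getD_eq_getElem _ _ _ hm]; exact List.getElem_mem hm
  rw [pvLookup, pv_lookup_mem gs _ hmem hnd]
  rfl

theorem pv_A_eq (gs : List (String × List String)) (hnd : (gs.map Prod.fst).Nodup) :
    cross_check_glossaries gs = pvSpecF gs := by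
  rw [cross_check_glossaries, pvSpecF,
      pv_enumerate_eq "" (gs.map Prod.fst) 0, List.foldl_map, List.length_map]
  apply PySem.List.foldl_congr_mem
  intro acc k hk
  have hkn : k < gs.length := List.mem_range.mp hk
  simp only [zero_add]
  have hinner :
      (List.map (fun (k' : Nat) => ((k' : Int), (List.map Prod.fst gs).getD k' ""))
          (List.range gs.length)).foldl (fun inner jf2 =>
        if (k : Int) ≥ jf2.1 then inner
        else
          if PySem.Set.inter (pvLookup gs ((List.map Prod.fst gs).getD k "")) (pvLookup gs jf2.2) ≠ [] then
            inner ++ [(jf2.2, PySem.Set.inter (pvLookup gs ((List.map Prod.fst gs).getD k "")) (pvLookup gs jf2.2))]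
          else inner) []
      = pvInnerS gs k := by
    rw [List.foldl_map, pvInnerS]
    have hguard : ∀ (inn : List (String × List String)) (k' : Nat), k' ∈ List.range gs.length →
        (if (k : Int) ≥ (k' : Int) then inn
         else
           if PySem.Set.inter (pvLookup gs ((List.map Prod.fst gs).getD k "")) (pvLookup gs ((List.map Prod.fst gs).getD k' "")) ≠ [] then
             inn ++ [((List.map Prod.fst gs).getD k' "", PySem.Set.inter (pvLookup gs ((List.map Prod.fst gs).getD k "")) (pvLookup gs ((List.map Prod.fst gs).getD k' "")))]
           else inn)
        = (if k' ≤ k then inn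
           else
             let q := gs.getD k' pvD0
             let shared := (gs.getD k pvD0).2.filter (fun t => PySem.Set.contains q.2 t)
             if shared ≠ [] then inn ++ [(q.1, shared)] else inn) := by
      intro inn k' hk'
      have hk'n : k' < gs.length := List.mem_range.mp hk'
      have hf : (gs.map Prod.fst).getD k' "" = (gs.getD k' pvD0).1 :=
        pv_getD_map gs Prod.fst k' "" pvD0 hk'n
      have hf1 : (gs.map Prod.fst).getD k "" = (gs.getD k pvD0).1 :=
        pv_getD_map gs Prod.fst k "" pvD0 hkn
      rw [hf, hf1, pv_lookup_getD gs k' hk'n hnd, pv_lookup_getD gs k hkn hnd]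
      by_cases hle : k' ≤ k
      · rw [if_pos (show (k : Int) ≥ (k' : Int) by omega), if_pos hle]
      · rw [if_neg (show ¬ ((k : Int) ≥ (k' : Int)) by omega), if_neg hle]
        simp only [PySem.Set.inter]
    rw [PySem.List.foldl_congr_mem _ _ _ _ hguard, pv_foldl_skip gs.length k _ []]
  rw [hinner]
  have hf1 : (gs.map Prod.fst).getD k "" = (gs.getD k pvD0).1 :=
    pv_getD_map gs Prod.fst k "" pvD0 hkn
  rw [hf1]

theorem pv_ite_emit {α β : Type} [DecidableEq α] {a b : List α} {x : β}
    {acc : List (β × List α)} (h : a = b) :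
    (if a ≠ [] then acc ++ [(x, a)] else acc) = (if b ≠ [] then acc ++ [(x, b)] else acc) := by
  rw [h]

theorem pv_B_eq (gs : List (String × List String))
    (hv : ∀ p ∈ gs, p.2.Nodup) :
    cross_check_glossaries_alt gs = pvSpecF gs := by
  have hvk : ∀ k ∈ List.range gs.length, (gs.getD k pvD0).2.Nodup := by
    intro k hk
    have hkn : k < gs.length := List.mem_range.mp hk
    rw [pv_getD_eq_getElem _ _ _ hkn]
    exact hv _ (List.getElem_mem hkn)
  simp only [cross_check_glossaries_alt, pvSpecF, pv_enumerate_eq pvD0, List.foldl_map, zero_add]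
  apply PySem.List.foldl_congr_mem
  intro acc k hk
  have hkn : k < gs.length := List.mem_range.mp hk
  apply pv_ite_emit
  have hCchar : ∀ t : String,
      ((List.range gs.length).foldl (fun x y =>
          List.foldl (fun d t => d.modify t [] fun x_1 => x_1 ++ [(y : Int)]) x (gs.getD y pvD0).2)
        PySem.Dict.empty).getD t []
      = ((List.range gs.length).filter (fun m => decide (t ∈ (gs.getD m pvD0).2))).map
          (fun (m : Nat) => (m : Int)) := by
    intro t
    rw [pv_containing_char gs _ hvk PySem.Dict.empty t, PySem.Dict.getD_empty, List.nil_append]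
  have hC : ∀ t : String,
      (((List.range gs.length).foldl (fun x y =>
          List.foldl (fun d t => d.modify t [] fun x_1 => x_1 ++ [(y : Int)]) x (gs.getD y pvD0).2)
        PySem.Dict.empty).getD t []).Nodup := by
    intro t
    rw [hCchar t]
    exact List.Nodup.map (fun a b => Int.natCast_inj.mp) (List.Nodup.filter _ List.nodup_range)
  have hcast : ((k : Int) + 1) = ((k + 1 : Nat) : Int) := by push_cast; ring
  rw [hcast, pv_pyRange_nat (k+1) gs.length, List.foldl_map, pvInnerS]
  apply PySem.List.foldl_congr_mem
  intro inn k2 hk2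
  have hk2n : k + 1 + k2 < gs.length := by
    have := List.mem_range.mp hk2; omega
  have hji : ((k + 1 + k2 : Nat) : Int) > (k : Int) := by push_cast; omega
  have hbg := pv_bucket_char (k : Int) ((k + 1 + k2 : Nat) : Int) hji _ hC
    ((gs.getD k pvD0).2) PySem.Dict.empty
  have hF : ((gs.getD k pvD0).2).filter (fun t => decide (((k + 1 + k2 : Nat) : Int) ∈
      ((List.range gs.length).foldl (fun x y =>
          List.foldl (fun d t => d.modify t [] fun x_1 => x_1 ++ [(y : Int)]) x (gs.getD y pvD0).2)
        PySem.Dict.empty).getD t []))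
      = ((gs.getD k pvD0).2).filter (fun t => PySem.Set.contains (gs.getD (k+1+k2) pvD0).2 t) := by
    apply List.filter_congr
    intro t ht
    rw [hCchar t, PySem.Set.contains_eq_decide]
    apply decide_eq_decide.mpr
    simp only [List.mem_map, List.mem_filter, List.mem_range]
    constructor
    · rintro ⟨m, ⟨hmn, hmt⟩, hmeq⟩
      have hm : m = k + 1 + k2 := Int.natCast_inj.mp hmeq
      subst hm
      exact of_decide_eq_true hmt
    · intro hmem
      exact ⟨k + 1 + k2, ⟨hk2n, decide_eq_true hmem⟩, rfl⟩
  have hget : ((gs.getD k pvD0).2.foldl (fun b t =>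
        List.foldl (fun b j => if j > (k : Int) then b.modify j [] fun x => x ++ [t] else b) b
          (((List.range gs.length).foldl (fun x y =>
              List.foldl (fun d t => d.modify t [] fun x_1 => x_1 ++ [(y : Int)]) x (gs.getD y pvD0).2)
            PySem.Dict.empty).getD t []))
      PySem.Dict.empty).get? ((k + 1 + k2 : Nat) : Int)
      = if ((gs.getD k pvD0).2).filter (fun t => PySem.Set.contains (gs.getD (k+1+k2) pvD0).2 t) = []
        then none
        else some (((gs.getD k pvD0).2).filter (fun t => PySem.Set.contains (gs.getD (k+1+k2) pvD0).2 t)) := by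
    rw [hbg]
    rw [hF]
    simp [pvCombine, PySem.Dict.get?_empty]
  rw [PySem.Dict.contains_eq_isSome_get?, hget]
  have hgd : ∀ (dd : PySem.Dict Int (List String)) (j : Int), dd.getD j [] = (dd.get? j).getD [] :=
    fun _ _ => rfl
  rw [hgd, hget]
  show _ = (if (List.filter (fun t => PySem.Set.contains (gs.getD (k + 1 + k2) pvD0).2 t) (gs.getD k pvD0).2) ≠ [] then
      inn ++ [((gs.getD (k + 1 + k2) pvD0).1,
        List.filter (fun t => PySem.Set.contains (gs.getD (k + 1 + k2) pvD0).2 t) (gs.getD k pvD0).2)]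
    else inn)
  by_cases hFe : List.filter (fun t => PySem.Set.contains (gs.getD (k + 1 + k2) pvD0).2 t) (gs.getD k pvD0).2 = []
  · rw [if_neg (by rw [if_pos hFe]; simp), if_neg (not_not_intro hFe)]
  · have hnodupF : ((gs.getD k pvD0).2.filter
        (fun t => PySem.Set.contains (gs.getD (k+1+k2) pvD0).2 t)).Nodup :=
      List.Nodup.filter _ (hvk k hk)
    rw [if_pos (by rw [if_neg hFe]; simp), if_pos hFe, if_neg hFe]
    simp only [Option.getD_some]
    rw [pv_ofList_nodup _ hnodupF]
    have hpg : PySem.List.pyGetD gs ((k + 1 + k2 : Nat) : Int) ("", []) = gs.getD (k + 1 + k2) pvD0 := by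
      rw [PySem.List.pyGetD_natCast]; rfl
    rw [hpg]

theorem pv_main (gs : List (String × List String)) (hpre : Pre_cross_check_glossaries gs) :
    cross_check_glossaries gs = cross_check_glossaries_alt gs :=
  (pv_A_eq gs hpre.1).trans (pv_B_eq gs hpre.2).symm

-- ===== VERDICT (by name: the statement is the Claim_ definition above) =====
theorem cross_check_glossaries_spec : Claim_equal_cross_check_glossaries := by
  intro gs _hdom hpre
  unfold Spec_cross_check_glossaries
  exact pv_main gs hpre
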